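-- pv_equiv track=rewrite | github.com/DarkhiveAI/dh-fork-flight_review | app/plot_app/helper.py | html_long_word_force_break
-- ===== SOURCE A (Python) =====
-- def html_long_word_force_break(text, max_length=15):
--     """
--     force line breaks for text that contains long words, suitable for HTML
--     display
--     """
--     ret = ''
--     for d in text.split(' '):
--         while len(d) > max_length:
--             ret += d[:max_length]+'<wbr />'
--             d = d[max_length:]
--         ret += d+' '
--
--     if len(ret) > 0:
--         return ret[:-1]
--     return ret
-- ===== SOURCE B (Python) =====
-- def html_long_word_force_break(text, max_length=15):
--     """
--     force line breaks for text that contains long words, suitable for HTML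
--     display
--     """
--     def chunked(word):
--         return '<wbr />'.join(word[i:i + max_length]
--                               for i in range(0, len(word), max_length))
--     return ' '.join(chunked(word) for word in text.split(' '))
-- ===== Notes on version B (the rewrite author's own statement) =====
-- stated objective: idiomatic
-- what changed: Replaces the while-loop that repeatedly slices the head off each word and the trailing-space-then-strip accumulation with arithmetic range-based chunking per word ('<wbr />'.join of word[i:i+max_length] slices) assembled by ' '.join.
-- outside the precondition, e.g. on html_long_word_force_break(' ', 0): A returns ' ', B raises ValueError; on html_long_word_force_break('', 0): A returns '', B raises ValueError
import Mathlib
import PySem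

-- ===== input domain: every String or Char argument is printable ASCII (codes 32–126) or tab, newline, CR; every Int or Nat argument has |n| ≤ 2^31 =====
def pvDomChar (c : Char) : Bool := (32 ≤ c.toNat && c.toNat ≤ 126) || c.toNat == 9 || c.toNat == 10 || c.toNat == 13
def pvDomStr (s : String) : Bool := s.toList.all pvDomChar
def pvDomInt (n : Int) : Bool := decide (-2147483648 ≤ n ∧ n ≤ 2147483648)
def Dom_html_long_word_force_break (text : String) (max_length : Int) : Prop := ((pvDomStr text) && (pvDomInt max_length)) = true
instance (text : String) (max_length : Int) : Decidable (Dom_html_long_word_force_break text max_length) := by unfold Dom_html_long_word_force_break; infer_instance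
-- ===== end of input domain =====

-- B replaces A's head-slicing while-loop and trailing-space-strip accumulation by
-- arithmetic range-based chunking per word joined with '<wbr />' and assembled by ' '.join
-- (objective: idiomatic; same asymptotic cost).


-- ===== PORT A =====
-- A's inner 'while len(d) > max_length' loop; fuel = d.length suffices under Pre_
-- (each iteration removes max_length ≥ 1 characters).
def pvAWhile (fuel : Nat) (max_length : Int) (ret d : List Char) : List Char × List Char :=
  match fuel with
  | 0 => (ret, d)
  | fuel + 1 =>
    if PySem.List.len d > max_length then
      pvAWhile fuel max_length
        (ret ++ PySem.List.slice d none (some max_length) ++ "<wbr />".toList)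
        (PySem.List.slice d (some max_length) none)
    else (ret, d)

def html_long_word_force_break (text : String) (max_length : Int) : String :=
  let ret : List Char :=
    (PySem.Chars.splitOn text.toList [' ']).foldl
      (fun ret d =>
        let p := pvAWhile d.length max_length ret d
        p.1 ++ p.2 ++ [' '])
      []
  if PySem.List.len ret > 0 then String.ofList (PySem.List.slice ret none (some (-1)))
  else String.ofList ret

-- ===== PORT B =====
-- '<wbr />'.join(word[i:i+max_length] for i in range(0, len(word), max_length))
def pvChunked (max_length : Int) (word : List Char) : List Char :=
  PySem.Chars.join "<wbr />".toList
    ((PySem.List.pyRange 0 (PySem.List.len word) max_length).map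
      (fun i => PySem.List.slice word (some i) (some (i + max_length))))

def html_long_word_force_break_alt (text : String) (max_length : Int) : String :=
  String.ofList (PySem.Chars.join [' ']
    ((PySem.Chars.splitOn text.toList [' ']).map (pvChunked max_length)))

-- ===== PRECONDITION & SPEC =====
-- Pre_ excludes max_length ≤ 0: there A loops forever on any text containing a non-space
-- character, and on the remaining degenerate inputs (max_length = 0 with only-space text,
-- which A returns unchanged) B raises ValueError (range() with step 0).
def Pre_html_long_word_force_break (text : String) (max_length : Int) : Prop :=
  1 ≤ max_length
instance (text : String) (max_length : Int) : Decidable (Pre_html_long_word_force_break text max_length) := by unfold Pre_html_long_word_force_break; infer_instance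

def pvWitness_html_long_word_force_break : String × Int := ("break theselongwords here", 4)

def Spec_html_long_word_force_break (text : String) (max_length : Int) (out : String) : Prop := out = html_long_word_force_break_alt text max_length
instance (text : String) (max_length : Int) (out : String) : Decidable (Spec_html_long_word_force_break text max_length out) := by unfold Spec_html_long_word_force_break; infer_instance

-- ===== CLAIM (what is proved, stated in full; the proofs are below) =====
def Claim_equal_html_long_word_force_break : Prop := ∀ (text : String) (max_length : Int), Dom_html_long_word_force_break text max_length → Pre_html_long_word_force_break text max_length → Spec_html_long_word_force_break text max_length (html_long_word_force_break text max_length)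

-- ===== LEMMAS AND PROOFS =====

-- Common per-word shape both ports compute: chunks of m characters separated by the tag.
def chunkSpec (m : Nat) (cs : List Char) : List Char :=
  if h : 0 < m ∧ m < cs.length then
    cs.take m ++ "<wbr />".toList ++ chunkSpec m (cs.drop m)
  else cs
termination_by cs.length
decreasing_by simp; omega

lemma splitOn_go_ne_nil (sep : List Char) :
    ∀ (fuel : Nat) (l cur : List Char) (acc : List (List Char)),
      PySem.Chars.splitOn.go sep fuel l cur acc ≠ [] := by
  intro fuel
  induction fuel with
  | zero => intro l cur acc; simp [PySem.Chars.splitOn.go]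
  | succ f ih =>
    intro l cur acc
    cases l with
    | nil => simp [PySem.Chars.splitOn.go]
    | cons c rest =>
      simp only [PySem.Chars.splitOn.go]
      split <;> apply ih

lemma splitOn_ne_nil (s sep : List Char) : PySem.Chars.splitOn s sep ≠ [] := by
  unfold PySem.Chars.splitOn
  apply splitOn_go_ne_nil

lemma pvAWhile_eq (m : Int) (hm : 1 ≤ m) :
    ∀ (fuel : Nat) (ret d : List Char), d.length ≤ fuel →
      (pvAWhile fuel m ret d).1 ++ (pvAWhile fuel m ret d).2 = ret ++ chunkSpec m.toNat d := by
  intro fuel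
  induction fuel with
  | zero =>
    intro ret d h
    have hd : d = [] := List.length_eq_zero_iff.mp (Nat.le_zero.mp h)
    subst hd
    rw [chunkSpec]
    simp [pvAWhile]
  | succ f ih =>
    intro ret d h
    by_cases hlen : PySem.List.len d > m
    · have hlen' : m < (d.length : Int) := by simpa [PySem.List.len_eq] using hlen
      simp only [pvAWhile, if_pos hlen]
      rw [PySem.List.slice_to d (by omega : (0:Int) ≤ m),
          PySem.List.slice_from d (by omega : (0:Int) ≤ m)]
      rw [ih (ret ++ d.take m.toNat ++ "<wbr />".toList) (d.drop m.toNat)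
            (by simp [List.length_drop]; omega)]
      conv_rhs => rw [chunkSpec]
      rw [dif_pos (by constructor <;> omega : 0 < m.toNat ∧ m.toNat < d.length)]
      simp [List.append_assoc]
    · have hlen' : ¬ m < (d.length : Int) := by simpa [PySem.List.len_eq] using hlen
      simp only [pvAWhile, if_neg hlen]
      conv_rhs => rw [chunkSpec]
      rw [dif_neg (by omega : ¬ (0 < m.toNat ∧ m.toNat < d.length))]

lemma pyRange_pos_shift (a b c s : Int) (hs : 0 < s) :
    PySem.List.pyRange (a + c) (b + c) s = (PySem.List.pyRange a b s).map (· + c) := by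
  rw [PySem.List.pyRange_of_pos _ _ hs, PySem.List.pyRange_of_pos _ _ hs, List.map_map]
  by_cases hab : a < b
  · rw [if_pos (by omega : a + c < b + c), if_pos hab]
    have h2 : b + c - (a + c) + s - 1 = b - a + s - 1 := by ring
    rw [h2]
    apply List.map_congr_left
    intro k _
    simp [Function.comp]
    ring
  · rw [if_neg (by omega : ¬ a + c < b + c), if_neg hab]
    simp

lemma pyRange_pos_cons (a b s : Int) (hs : 0 < s) (hab : a < b) :
    PySem.List.pyRange a b s = a :: PySem.List.pyRange (a + s) b s := by
  rw [PySem.List.pyRange_of_pos _ _ hs, PySem.List.pyRange_of_pos _ _ hs, if_pos hab]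
  by_cases h2 : a + s < b
  · rw [if_pos h2]
    have he : b - a + s - 1 = (b - (a + s) + s - 1) + 1 * s := by ring
    rw [he, Int.add_mul_ediv_right _ _ (by omega : s ≠ 0)]
    have hnn : 0 ≤ (b - (a + s) + s - 1) / s := Int.ediv_nonneg (by omega) (by omega)
    rw [Int.toNat_add hnn (by norm_num)]
    simp only [Int.toNat_one]
    rw [List.range_succ_eq_map]
    simp only [List.map_cons, List.map_map, Nat.cast_zero, mul_zero, add_zero]
    congr 1
    apply List.map_congr_left
    intro k _
    simp [Function.comp, Nat.succ_eq_add_one]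
    ring
  · rw [if_neg h2]
    have hr : (b - a + s - 1) / s = 1 := by
      have he : b - a + s - 1 = (b - a - 1) + 1 * s := by ring
      rw [he, Int.add_mul_ediv_right _ _ (by omega : s ≠ 0),
          Int.ediv_eq_zero_of_lt (by omega) (by omega)]
      omega
    rw [hr]
    norm_num [List.range_succ]

lemma join_cons_ne_nil (sep p : List Char) (qs : List (List Char)) (h : qs ≠ []) :
    PySem.Chars.join sep (p :: qs) = p ++ sep ++ PySem.Chars.join sep qs := by
  cases qs with
  | nil => exact absurd rfl h
  | cons q t => exact PySem.Chars.join_cons_cons sep p q t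

lemma pvChunked_eq (m : Int) (hm : 1 ≤ m) :
    ∀ (n : Nat) (d : List Char), d.length ≤ n → pvChunked m d = chunkSpec m.toNat d := by
  intro n
  induction n with
  | zero =>
    intro d h
    have hd : d = [] := List.length_eq_zero_iff.mp (Nat.le_zero.mp h)
    subst hd
    rw [chunkSpec]
    simp [pvChunked, PySem.List.pyRange_of_pos 0 0 (by omega : (0:Int) < m),
      PySem.Chars.join_nil]
  | succ n ih =>
    intro d h
    by_cases hL : (m : Int) < (d.length : Int)
    · -- long word: peel one chunk of m characters
      have hlen1 : 1 ≤ d.length := by omega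
      have hcons := pyRange_pos_cons 0 (d.length : Int) m (by omega) (by omega)
      have hshift := pyRange_pos_shift 0 ((d.length : Int) - m) m m (by omega)
      rw [show (d.length : Int) - m + m = (d.length : Int) by ring] at hshift
      simp only [pvChunked, PySem.List.len_eq]
      rw [hcons, hshift]
      simp only [List.map_cons, List.map_map]
      have hhead : PySem.List.slice d (some 0) (some (0 + m)) = d.take m.toNat := by
        rw [zero_add, PySem.List.slice_zero_start, PySem.List.slice_to d (by omega)]
      have htail : ∀ i ∈ PySem.List.pyRange 0 ((d.length : Int) - m) m,
          ((fun i => PySem.List.slice d (some i) (some (i + m))) ∘ (· + m)) i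
            = PySem.List.slice (d.drop m.toNat) (some i) (some (i + m)) := by
        intro i hi
        have hi0 : 0 ≤ i := ((PySem.List.mem_pyRange_iff_of_pos (by omega) i).mp hi).1
        simp only [Function.comp]
        rw [PySem.List.slice_toNat _ (by omega) (by omega),
            PySem.List.slice_toNat _ (by omega) (by omega), List.drop_drop]
        congr 1
        · omega
        · congr 1
          omega
      rw [List.map_congr_left htail, hhead]
      have htne : (PySem.List.pyRange 0 ((d.length : Int) - m) m).map
          (fun i => PySem.List.slice (d.drop m.toNat) (some i) (some (i + m))) ≠ [] := by
        rw [pyRange_pos_cons 0 _ m (by omega) (by omega)]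
        simp
      rw [join_cons_ne_nil _ _ _ htne]
      have hdrop : PySem.Chars.join "<wbr />".toList
          ((PySem.List.pyRange 0 ((d.length : Int) - m) m).map
            (fun i => PySem.List.slice (d.drop m.toNat) (some i) (some (i + m))))
          = pvChunked m (d.drop m.toNat) := by
        simp only [pvChunked, PySem.List.len_eq, List.length_drop]
        rw [show ((d.length - m.toNat : Nat) : Int) = (d.length : Int) - m from by omega]
      rw [hdrop, ih (d.drop m.toNat) (by simp [List.length_drop]; omega)]
      conv_rhs => rw [chunkSpec]
      rw [dif_pos (by constructor <;> omega : 0 < m.toNat ∧ m.toNat < d.length)]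
    · by_cases hd : d = []
      · subst hd
        rw [chunkSpec]
        simp [pvChunked, PySem.List.pyRange_of_pos 0 0 (by omega : (0:Int) < m),
          PySem.Chars.join_nil]
      · have hlen1 : 1 ≤ d.length := by
          have := List.length_pos_of_ne_nil hd
          omega
        simp only [pvChunked, PySem.List.len_eq]
        rw [pyRange_pos_cons 0 _ m (by omega) (by exact_mod_cast by omega : (0:Int) < (d.length : Int))]
        rw [PySem.List.pyRange_of_pos _ _ (by omega : (0:Int) < m),
            if_neg (by omega : ¬ (0 + m < (d.length : Int)))]
        simp only [List.range_zero, List.map_nil, List.map_cons]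
        rw [PySem.Chars.join_singleton, zero_add, PySem.List.slice_zero_start,
            PySem.List.slice_to d (by omega), List.take_of_length_le (by omega)]
        conv_rhs => rw [chunkSpec]
        rw [dif_neg (by omega : ¬ (0 < m.toNat ∧ m.toNat < d.length))]

lemma foldl_words (m : Int) (hm : 1 ≤ m) :
    ∀ (ws : List (List Char)) (r0 : List Char),
      ws.foldl (fun ret d =>
        let p := pvAWhile d.length m ret d
        p.1 ++ p.2 ++ [' ']) r0
        = r0 ++ (ws.map (fun w => chunkSpec m.toNat w ++ [' '])).flatten := by
  intro ws
  induction ws with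
  | nil => simp
  | cons w t ih =>
    intro r0
    simp only [List.foldl_cons, List.map_cons, List.flatten_cons]
    rw [ih]
    rw [pvAWhile_eq m hm w.length r0 w le_rfl]
    simp [List.append_assoc]

lemma flatten_space_dropLast :
    ∀ (ps : List (List Char)), ps ≠ [] →
      ((ps.map (fun p => p ++ [' '])).flatten).dropLast = PySem.Chars.join [' '] ps := by
  intro ps
  induction ps with
  | nil => simp
  | cons p rest ih =>
    intro _
    cases rest with
    | nil => simp [PySem.Chars.join_singleton]
    | cons q t =>
      rw [PySem.Chars.join_cons_cons, List.map_cons, List.flatten_cons]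
      have hne : (List.map (fun p => p ++ [' ']) (q :: t)).flatten ≠ [] := by simp
      rw [List.dropLast_append_of_ne_nil hne, ih (by simp)]

-- ===== VERDICT (by name: the statement is the Claim_ definition above) =====
theorem html_long_word_force_break_spec : Claim_equal_html_long_word_force_break := by
  intro text m _ hpre
  unfold Spec_html_long_word_force_break
  have hm : 1 ≤ m := hpre
  simp only [html_long_word_force_break, html_long_word_force_break_alt]
  rw [foldl_words m hm]
  rw [List.nil_append]
  cases hws : PySem.Chars.splitOn text.toList [' '] with
  | nil => exact absurd hws (splitOn_ne_nil _ _)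
  | cons w t =>
    have hretne : (((w :: t).map (fun v => chunkSpec m.toNat v ++ [' '])).flatten) ≠ [] := by
      simp
    have hpos : PySem.List.len (((w :: t).map (fun v => chunkSpec m.toNat v ++ [' '])).flatten) > 0 := by
      rw [PySem.List.len_eq]
      exact_mod_cast List.length_pos_iff.mpr hretne
    rw [if_pos hpos, PySem.List.slice_to_neg_one]
    rw [show (w :: t).map (fun v => chunkSpec m.toNat v ++ [' '])
          = ((w :: t).map (chunkSpec m.toNat)).map (fun p => p ++ [' ']) from by
        simp]
    rw [flatten_space_dropLast _ (by simp)]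
    congr 1
    congr 1
    apply List.map_congr_left
    intro v _
    exact (pvChunked_eq m hm v.length v le_rfl).symm
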